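-- pv_equiv track=rewrite | github.com/KozyarValeriy/flask_project | ExternalModule/ItemInCSV.py | get_separator
-- ===== SOURCE A (Python) =====
-- sep_list = [",", "|", ";", "\t"]
--
-- def get_separator(head):
--     """
--     :return: return separator from input csv file
--     """
--     dic = {}
--     for item in sep_list:
--         dic[item] = 0
--     for item in sep_list:
--         dic[item] = len(head.split(item))
--     separator = max(dic, key=dic.get)
--     return separator
-- ===== SOURCE B (Python) =====
-- sep_list = [",", "|", ";", "\t"]
--
-- def get_separator(head):
--     """
--     :return: return separator from input csv file
--     """
--     dic = {s: 0 for s in sep_list}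
--     for ch in head:
--         if ch in dic:
--             dic[ch] += 1
--     return max(dic, key=dic.get)
-- ===== Notes on version B (the rewrite author's own statement) =====
-- stated objective: alternative
-- what changed: Replaces four independent str.split scans (storing split-lengths) by a single pass over the characters of head maintaining a frequency table pre-populated in sep_list order; counts differ uniformly from split-lengths by 1, so the first-maximal-key argmax is unchanged.
import Mathlib
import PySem

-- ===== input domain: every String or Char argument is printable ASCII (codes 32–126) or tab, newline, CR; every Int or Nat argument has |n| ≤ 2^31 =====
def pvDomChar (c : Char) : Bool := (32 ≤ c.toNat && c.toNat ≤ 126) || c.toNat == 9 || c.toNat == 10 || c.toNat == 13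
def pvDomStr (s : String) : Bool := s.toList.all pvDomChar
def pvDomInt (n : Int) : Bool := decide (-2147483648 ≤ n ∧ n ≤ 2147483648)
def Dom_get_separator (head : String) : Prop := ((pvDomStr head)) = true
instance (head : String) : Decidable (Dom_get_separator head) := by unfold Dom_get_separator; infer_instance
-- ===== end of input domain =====

-- B replaces A's four independent split scans with one pass over the characters
-- maintaining a frequency table pre-populated in sep_list order (alternative decomposition).


-- module-level constant sep_list shared by both Pythons
def pvSepList : List String := [",", "|", ";", "\t"]

-- ===== PORT A =====
-- head.split(item): item is never "", so split? is always some (getD [] is unreachable)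
def get_separator (head : String) : String :=
  let dic : PySem.Dict String Int :=
    pvSepList.foldl (fun d item => d.insert item 0) PySem.Dict.empty
  let dic : PySem.Dict String Int :=
    pvSepList.foldl (fun d item =>
      d.insert item (((PySem.Str.split? head item).getD []).length : Int)) dic
  match PySem.List.max? dic.keys (fun k => dic.getD k 0) with
  | some s => s
  | none => ""   -- unreachable: dic always has four keys

-- ===== PORT B =====
-- Python's single-character string dict keys (the iterated characters of head) are ported as Char
def get_separator_alt (head : String) : String :=
  let dic : PySem.Dict Char Int :=
    [',', '|', ';', '\t'].foldl (fun d s => d.insert s 0) PySem.Dict.empty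
  let dic : PySem.Dict Char Int :=
    head.toList.foldl (fun d ch =>
      if d.contains ch then d.insert ch (d.getD ch 0 + 1) else d) dic
  match PySem.List.max? dic.keys (fun k => dic.getD k 0) with
  | some c => String.ofList [c]
  | none => ""   -- unreachable: dic always has four keys

-- ===== PRECONDITION & SPEC =====
def Spec_get_separator (head : String) (out : String) : Prop := out = get_separator_alt head
instance (head : String) (out : String) : Decidable (Spec_get_separator head out) := by unfold Spec_get_separator; infer_instance

-- ===== CLAIM (what is proved, stated in full; the proofs are below) =====
def Claim_equal_get_separator : Prop := ∀ (head : String), Dom_get_separator head → Spec_get_separator head (get_separator head)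

-- ===== LEMMAS AND PROOFS =====

-- length of Python's split by a single-character separator = occurrence count + 1
lemma pv_go_len (c : Char) : ∀ (fuel : Nat) (l cur : List Char) (acc : List (List Char)), l.length < fuel →
    (PySem.Chars.splitOn.go [c] fuel l cur acc).length = acc.length + 1 + l.count c := by
  intro fuel
  induction fuel with
  | zero => intro l cur acc h; omega
  | succ n ih =>
    intro l cur acc h
    cases l with
    | nil => simp [PySem.Chars.splitOn.go]
    | cons c0 rest =>
      rw [PySem.Chars.splitOn.go]
      by_cases hp : [c].isPrefixOf (c0 :: rest)
      · rw [if_pos (by simp [hp])]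
        have : c = c0 := by simpa [List.isPrefixOf] using hp
        subst this
        rw [ih _ _ _ (by simpa using Nat.lt_of_succ_lt_succ h)]
        simp
        omega
      · rw [if_neg (by simp [hp])]
        have hne : c0 ≠ c := by
          intro he; apply hp; simp [List.isPrefixOf, he]
        rw [ih _ _ _ (by simpa using Nat.lt_of_succ_lt_succ h)]
        simp [hne]

lemma pv_split_len (s : String) (c : Char) :
    ((PySem.Str.split? s (String.ofList [c])).getD []).length = s.toList.count c + 1 := by
  simp [PySem.Str.split?, PySem.Chars.split?, PySem.Chars.splitOn]
  rw [pv_go_len c (s.length + 1) s.toList [] [] (by simp)]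
  simp [Nat.add_comm]

-- first-maximal element of a four-element list, written out
def pvArgmax4 {α : Type} (k1 k2 k3 k4 : α) (v1 v2 v3 v4 : Int) : α :=
  if v1 < v2 then
    (if v2 < v3 then (if v3 < v4 then k4 else k3) else (if v2 < v4 then k4 else k2))
  else
    (if v1 < v3 then (if v3 < v4 then k4 else k3) else (if v1 < v4 then k4 else k1))

lemma pv_max4 {α : Type} (k1 k2 k3 k4 : α) (f : α → Int) :
    PySem.List.max? [k1, k2, k3, k4] f = some (pvArgmax4 k1 k2 k3 k4 (f k1) (f k2) (f k3) (f k4)) := by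
  simp only [PySem.List.max?, List.foldl, pvArgmax4]
  split_ifs <;> simp_all <;> split_ifs <;> simp_all <;> omega

-- shifting all four values by 1 does not move the argmax
lemma pvArgmax4_shift {α : Type} (k1 k2 k3 k4 : α) (v1 v2 v3 v4 : Int) :
    pvArgmax4 k1 k2 k3 k4 (v1 + 1) (v2 + 1) (v3 + 1) (v4 + 1) = pvArgmax4 k1 k2 k3 k4 v1 v2 v3 v4 := by
  simp only [pvArgmax4]
  split_ifs <;> first | rfl | omega

lemma pvArgmax4_str (v1 v2 v3 v4 : Int) :
    pvArgmax4 "," "|" ";" "\t" v1 v2 v3 v4 = String.ofList [pvArgmax4 ',' '|' ';' '\t' v1 v2 v3 v4] := by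
  simp only [pvArgmax4]
  split_ifs <;> rfl

-- one step of B's counting loop on the four-key dict
lemma pv_stepB (a b c d : Int) (c0 : Char) :
    (if (PySem.Dict.mk [(',', a), ('|', b), (';', c), ('\t', d)]).contains c0
      then (PySem.Dict.mk [(',', a), ('|', b), (';', c), ('\t', d)]).insert c0
        ((PySem.Dict.mk [(',', a), ('|', b), (';', c), ('\t', d)]).getD c0 0 + 1)
      else PySem.Dict.mk [(',', a), ('|', b), (';', c), ('\t', d)])
    = PySem.Dict.mk [(',', a + if c0 = ',' then 1 else 0), ('|', b + if c0 = '|' then 1 else 0),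
        (';', c + if c0 = ';' then 1 else 0), ('\t', d + if c0 = '\t' then 1 else 0)] := by
  by_cases h1 : c0 = ','
  · subst h1; simp [PySem.Dict.contains, PySem.Dict.getD, PySem.Dict.get?_mk_cons, PySem.Dict.insert]
  by_cases h2 : c0 = '|'
  · subst h2; simp [PySem.Dict.contains, PySem.Dict.getD, PySem.Dict.get?_mk_cons, PySem.Dict.insert]
  by_cases h3 : c0 = ';'
  · subst h3; simp [PySem.Dict.contains, PySem.Dict.getD, PySem.Dict.get?_mk_cons, PySem.Dict.insert]
  by_cases h4 : c0 = '\t'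
  · subst h4; simp [PySem.Dict.contains, PySem.Dict.getD, PySem.Dict.get?_mk_cons, PySem.Dict.insert]
  · simp [PySem.Dict.contains, h1, h2, h3, h4, Ne.symm h1, Ne.symm h2, Ne.symm h3, Ne.symm h4]

-- B's counting loop computes the four character counts
lemma pv_foldB (l : List Char) : ∀ (a b c d : Int),
    l.foldl (fun d ch => if d.contains ch then d.insert ch (d.getD ch 0 + 1) else d)
      (PySem.Dict.mk [(',', a), ('|', b), (';', c), ('\t', d)])
    = PySem.Dict.mk [(',', a + l.count ','), ('|', b + l.count '|'),
        (';', c + l.count ';'), ('\t', d + l.count '\t')] := by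
  induction l with
  | nil => simp
  | cons c0 rest ih =>
    intro a b c d
    rw [List.foldl_cons, pv_stepB, ih]
    apply PySem.Dict.ext
    simp only [List.count_cons]
    refine by split_ifs with h <;> simp_all <;> omega

-- ===== VERDICT (by name: the statement is the Claim_ definition above) =====
theorem get_separator_spec : Claim_equal_get_separator := by
  intro head _
  unfold Spec_get_separator
  symm
  -- A's side: the two dict-building loops over the literal sep_list compute by rfl
  have hA : get_separator head =
      (match PySem.List.max? [",", "|", ";", "\t"]
          (fun k => (PySem.Dict.mk
            [(",", (((PySem.Str.split? head ",").getD []).length : Int)),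
             ("|", (((PySem.Str.split? head "|").getD []).length : Int)),
             (";", (((PySem.Str.split? head ";").getD []).length : Int)),
             ("\t", (((PySem.Str.split? head "\t").getD []).length : Int))]).getD k 0) with
        | some s => s
        | none => "") := rfl
  -- B's side: reduce the initial dict by rfl, then the counting loop by pv_foldB
  have hB : get_separator_alt head =
      (match PySem.List.max? [',', '|', ';', '\t']
          (fun k => (PySem.Dict.mk
            [(',', ((0 : Int) + head.toList.count ',')), ('|', ((0 : Int) + head.toList.count '|')),
             (';', ((0 : Int) + head.toList.count ';')), ('\t', ((0 : Int) + head.toList.count '\t'))]).getD k 0) with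
        | some c => String.ofList [c]
        | none => "") := by
    simp only [get_separator_alt]
    rw [show ([',', '|', ';', '\t'].foldl (fun d s => d.insert s 0) PySem.Dict.empty : PySem.Dict Char Int)
        = PySem.Dict.mk [(',', 0), ('|', 0), (';', 0), ('\t', 0)] from rfl]
    rw [pv_foldB]
    rfl
  rw [hA, hB, pv_max4, pv_max4]
  show String.ofList [pvArgmax4 ',' '|' ';' '\t'
      ((0:Int) + head.toList.count ',') ((0:Int) + head.toList.count '|')
      ((0:Int) + head.toList.count ';') ((0:Int) + head.toList.count '\t')]
    = pvArgmax4 "," "|" ";" "\t"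
      (((PySem.Str.split? head (String.ofList [','])).getD []).length : Int)
      (((PySem.Str.split? head (String.ofList ['|'])).getD []).length : Int)
      (((PySem.Str.split? head (String.ofList [';'])).getD []).length : Int)
      (((PySem.Str.split? head (String.ofList ['\t'])).getD []).length : Int)
  rw [pv_split_len, pv_split_len, pv_split_len, pv_split_len]
  push_cast
  simp only [zero_add]
  rw [pvArgmax4_shift, pvArgmax4_str]
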